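-- pv_equiv track=rewrite | github.com/jubyshu/learnPython | algrithm/mooncake.py | mooncake
-- ===== SOURCE A (Python) =====
-- def distribute(m, p, k):
--     # m为待分配的人数, p为剩余的月饼
--     # 在剩余的月饼中，假设第一个人总是分到最少，为k个
--     if m <= 0 or p <= 0:
--         # 人数为0或月饼数少于人数, 有0种分配方案
--         return 0
--
--     if m == 1:
--         if k <= p <= k + 3:
--             # 两人时, 第一人已经分到k个, 第二人要分的月饼在[k, k+3]之间, 则为1种有效方案
--             return 1
--         else:
--             return 0
--
--     cnt = 0
--     for i in range(k, k + 4):  # k取不同值时的分配方案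
--         cnt += distribute(m - 1, p - i, i)
--     return cnt
--
-- def mooncake(m, n):
--     p = n - m
--     cnt = 0
--     i = 0
--     while i <= p:
--         cnt += distribute(m - 1, p - i, i)
--         i += 1
--     return cnt
-- ===== SOURCE B (Python) =====
-- def mooncake(m, n):
--     p = n - m
--     memo = {}
--
--     def d(mm, pp, kk):
--         if mm <= 0 or pp <= 0:
--             return 0
--         # feasibility pruning: the mm shares are >= kk each and at most
--         # kk, kk+3, kk+6, ... so their total lies in
--         # [mm*kk, mm*kk + 3*mm*(mm+1)/2]; outside that window the count is 0
--         if pp < mm * kk or 2 * pp > 2 * mm * kk + 3 * mm * (mm + 1):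
--             return 0
--         if mm == 1:
--             return 1 if kk <= pp <= kk + 3 else 0
--         key = (mm, pp, kk)
--         if key in memo:
--             return memo[key]
--         total = 0
--         for i in range(kk, kk + 4):
--             total += d(mm - 1, pp - i, i)
--         memo[key] = total
--         return total
--
--     cnt = 0
--     for i in range(p + 1):
--         cnt += d(m - 1, p - i, i)
--     return cnt
-- ===== Notes on version B (the rewrite author's own statement) =====
-- stated objective: alternative
-- what changed: B re-implements A's naive recursion as memoized dynamic programming: a memo dict on the states (people, remaining, minimum) plus an exact feasibility window that prunes infeasible states.
import Mathlib
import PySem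

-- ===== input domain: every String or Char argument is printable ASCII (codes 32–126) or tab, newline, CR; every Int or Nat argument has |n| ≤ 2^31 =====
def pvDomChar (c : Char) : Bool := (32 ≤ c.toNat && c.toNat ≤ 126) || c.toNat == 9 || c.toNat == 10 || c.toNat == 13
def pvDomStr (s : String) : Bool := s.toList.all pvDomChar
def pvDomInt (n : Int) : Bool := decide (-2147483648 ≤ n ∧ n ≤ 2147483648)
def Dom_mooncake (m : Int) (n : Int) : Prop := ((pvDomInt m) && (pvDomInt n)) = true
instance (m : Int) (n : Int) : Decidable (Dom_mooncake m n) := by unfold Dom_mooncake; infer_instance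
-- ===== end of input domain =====

-- B re-implements A's naive recursion as memoized dynamic programming (a memo dict on the
-- states (people, remaining, minimum) plus an exact feasibility window pruning dead states).

-- ===== PORT A =====
def distributeA (m p k : Int) : Int :=
  if m ≤ 0 ∨ p ≤ 0 then 0
  else if m = 1 then (if k ≤ p ∧ p ≤ k + 3 then 1 else 0)
  else (PySem.List.pyRange k (k + 4) 1).foldl (fun cnt i => cnt + distributeA (m - 1) (p - i) i) 0
termination_by m.toNat
decreasing_by omega

def mooncakeLoop (m p i cnt : Int) : Int :=
  if i ≤ p then mooncakeLoop m p (i + 1) (cnt + distributeA (m - 1) (p - i) i) else cnt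
termination_by (p + 1 - i).toNat
decreasing_by omega

def mooncake (m : Int) (n : Int) : Int :=
  mooncakeLoop m (n - m) 0 0

-- ===== PORT B =====
-- memo dict keyed on (mm, pp, kk), threaded through the recursion as in Source B;
-- the second guard is Source B's feasibility window (proved exact in distributeA_bounds below)
def dAlt (mm pp kk : Int) (memo : PySem.Dict (Int × Int × Int) Int) :
    Int × PySem.Dict (Int × Int × Int) Int :=
  if mm ≤ 0 ∨ pp ≤ 0 then (0, memo)
  else if pp < mm * kk ∨ 2 * pp > 2 * mm * kk + 3 * mm * (mm + 1) then (0, memo)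
  else if mm = 1 then ((if kk ≤ pp ∧ pp ≤ kk + 3 then 1 else 0), memo)
  else
    match memo.get? (mm, pp, kk) with
    | some v => (v, memo)
    | none =>
      let st := (PySem.List.pyRange kk (kk + 4) 1).foldl
        (fun st i =>
          let r := dAlt (mm - 1) (pp - i) i st.2
          (st.1 + r.1, r.2)) (0, memo)
      (st.1, st.2.insert (mm, pp, kk) st.1)
termination_by mm.toNat
decreasing_by omega

def mooncake_alt (m : Int) (n : Int) : Int :=
  let p := n - m
  ((PySem.List.pyRange 0 (p + 1) 1).foldl
    (fun st i =>
      let r := dAlt (m - 1) (p - i) i st.2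
      (st.1 + r.1, r.2)) (0, PySem.Dict.empty)).1

-- ===== PRECONDITION & SPEC =====
-- Pre_ excludes exactly the inputs (n > m with m ≥ 9999) on which both Pythons RAISE
-- RecursionError: each descends through m − 1 nested recursive calls there, which exceeds the
-- harness's recursion limit of 10000 (measured: both return at m = 9998, both raise at m = 9999).
def Pre_mooncake (m : Int) (n : Int) : Prop := m ≤ 9998 ∨ n ≤ m
instance (m : Int) (n : Int) : Decidable (Pre_mooncake m n) := by unfold Pre_mooncake; infer_instance
def pvWitness_mooncake : Int × Int := (5, 30)

def Spec_mooncake (m : Int) (n : Int) (out : Int) : Prop := out = mooncake_alt m n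
instance (m : Int) (n : Int) (out : Int) : Decidable (Spec_mooncake m n out) := by unfold Spec_mooncake; infer_instance

-- ===== CLAIM (what is proved, stated in full; the proofs are below) =====
def Claim_equal_mooncake : Prop := ∀ (m : Int) (n : Int), Dom_mooncake m n → Pre_mooncake m n → Spec_mooncake m n (mooncake m n)

-- ===== LEMMAS AND PROOFS =====

theorem foldl_add_of_all_zero (f : Int → Int) (l : List Int) (h : ∀ i ∈ l, f i = 0) :
    ∀ c : Int, l.foldl (fun c i => c + f i) c = c := by
  induction l with
  | nil => intro c; rfl
  | cons x xs ih =>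
    intro c
    simp only [List.foldl, h x (List.mem_cons_self)]
    simpa using ih (fun i hi => h i (List.mem_cons_of_mem x hi)) c

-- outside the feasibility window [mm*kk, mm*kk + 3*mm*(mm+1)/2] A's distribute is 0
theorem distributeA_bounds : ∀ (N : Nat) (mm pp kk : Int), mm.toNat ≤ N →
    (pp < mm * kk ∨ 2 * pp > 2 * mm * kk + 3 * mm * (mm + 1)) →
    distributeA mm pp kk = 0 := by
  intro N
  induction N with
  | zero =>
    intro mm pp kk hN hout
    have hm : mm ≤ 0 := by omega
    rw [distributeA]; simp [hm]
  | succ N ih =>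
    intro mm pp kk hN hout
    rw [distributeA]
    by_cases hbase : mm ≤ 0 ∨ pp ≤ 0
    · simp [if_pos hbase]
    have hm : ¬ mm ≤ 0 := fun h => hbase (Or.inl h)
    have hp : ¬ pp ≤ 0 := fun h => hbase (Or.inr h)
    by_cases hone : mm = 1
    · subst hone
      have : ¬ (kk ≤ pp ∧ pp ≤ kk + 3) := by
        rcases hout with h | h
        · intro hc; omega
        · intro hc; nlinarith
      simp [this]
    simp only [hbase, hone, if_false]
    apply foldl_add_of_all_zero
    intro i hi
    rw [PySem.List.mem_pyRange_one] at hi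
    obtain ⟨hki, hik⟩ := hi
    apply ih (mm - 1) (pp - i) i (by omega)
    rcases hout with h | h
    · left
      have h1 : mm * kk ≤ mm * i := mul_le_mul_of_nonneg_left hki (by omega)
      have e1 : (mm - 1) * i = mm * i - i := by ring
      omega
    · right
      have h2 : mm * i ≤ mm * (kk + 3) := mul_le_mul_of_nonneg_left (by omega) (by omega)
      have e1 : mm * (kk + 3) = mm * kk + 3 * mm := by ring
      have e2 : (mm - 1) * i = mm * i - i := by ring
      have e3 : 3 * (mm - 1) * (mm - 1 + 1) = 3 * (mm * (mm + 1)) - 6 * mm := by ring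
      have e4 : 3 * mm * (mm + 1) = 3 * (mm * (mm + 1)) := by ring
      have e5 : 2 * mm * kk = 2 * (mm * kk) := by ring
      have e6 : 2 * (mm - 1) * i = 2 * ((mm - 1) * i) := by ring
      omega

-- invariant: every value stored in the memo is the corresponding value of A's distribute
def InvD (memo : PySem.Dict (Int × Int × Int) Int) : Prop :=
  ∀ q v, memo.get? q = some v → v = distributeA q.1 q.2.1 q.2.2

theorem InvD_empty : InvD PySem.Dict.empty := by
  intro q v h
  simp [PySem.Dict.get?_empty] at h

-- generic: threading a memo through a fold of correct-and-invariant-preserving calls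
theorem fold_pair_correct
    (g : Int → PySem.Dict (Int × Int × Int) Int → Int × PySem.Dict (Int × Int × Int) Int)
    (s : Int → Int)
    (hg : ∀ i memo, InvD memo → (g i memo).1 = s i ∧ InvD (g i memo).2)
    (l : List Int) :
    ∀ (cnt : Int) (memo : PySem.Dict (Int × Int × Int) Int), InvD memo →
      (l.foldl (fun st i => let r := g i st.2; (st.1 + r.1, r.2)) (cnt, memo)).1
        = l.foldl (fun c i => c + s i) cnt
      ∧ InvD (l.foldl (fun st i => let r := g i st.2; (st.1 + r.1, r.2)) (cnt, memo)).2 := by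
  induction l with
  | nil => intro cnt memo h; exact ⟨rfl, h⟩
  | cons x xs ih =>
    intro cnt memo h
    obtain ⟨h1, h2⟩ := hg x memo h
    simpa [List.foldl, h1] using ih (cnt + s x) (g x memo).2 h2

theorem dAlt_correct : ∀ (N : Nat) (mm pp kk : Int)
    (memo : PySem.Dict (Int × Int × Int) Int), mm.toNat ≤ N → InvD memo →
    (dAlt mm pp kk memo).1 = distributeA mm pp kk ∧ InvD (dAlt mm pp kk memo).2 := by
  intro N
  induction N with
  | zero =>
    intro mm pp kk memo hN hinv
    have hm : mm ≤ 0 := by omega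
    rw [dAlt, distributeA]
    simp [hm]
    exact hinv
  | succ N ih =>
    intro mm pp kk memo hN hinv
    rw [dAlt, distributeA]
    by_cases hbase : mm ≤ 0 ∨ pp ≤ 0
    · simp only [if_pos hbase]
      exact ⟨trivial, hinv⟩
    have hm : ¬ mm ≤ 0 := fun h => hbase (Or.inl h)
    have hp : ¬ pp ≤ 0 := fun h => hbase (Or.inr h)
    by_cases hprune : pp < mm * kk ∨ 2 * pp > 2 * mm * kk + 3 * mm * (mm + 1)
    · simp only [hbase, if_false, if_pos hprune]
      refine ⟨?_, hinv⟩
      have h0 := distributeA_bounds mm.toNat mm pp kk le_rfl hprune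
      rw [distributeA] at h0
      simp only [hbase, if_false] at h0
      exact h0.symm
    by_cases hone : mm = 1
    · subst hone
      rw [if_neg hprune]
      simp [hp]
      exact hinv
    simp only [hbase, hone, hprune, if_false]
    obtain ⟨hfold1, hfold2⟩ := fold_pair_correct
      (fun i memo' => dAlt (mm - 1) (pp - i) i memo')
      (fun i => distributeA (mm - 1) (pp - i) i)
      (fun i memo' h' => ih (mm - 1) (pp - i) i memo' (by omega) h')
      (PySem.List.pyRange kk (kk + 4) 1) 0 memo hinv
    cases hget : memo.get? (mm, pp, kk) with
    | some v =>
      refine ⟨?_, hinv⟩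
      have hv := hinv (mm, pp, kk) v hget
      simp only []
      rw [hv, distributeA]
      simp [hbase, hone]
    | none =>
      refine ⟨hfold1, ?_⟩
      intro q w hq
      simp only [] at hq
      rw [PySem.Dict.get?_insert] at hq
      by_cases hqk : q = (mm, pp, kk)
      · rw [if_pos hqk] at hq
        have hw := Option.some.inj hq
        subst hqk
        simp only []
        rw [← hw, hfold1, distributeA]
        simp [hbase, hone]
      · rw [if_neg hqk] at hq
        exact hfold2 q w hq

-- A's while-loop equals a fold over range(0, p+1)
theorem loopA_eq (m p : Int) : ∀ (M : Nat) (i cnt : Int), (p + 1 - i).toNat ≤ M →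
    mooncakeLoop m p i cnt
      = (PySem.List.pyRange i (p + 1) 1).foldl
          (fun c j => c + distributeA (m - 1) (p - j) j) cnt := by
  intro M
  induction M with
  | zero =>
    intro i cnt hM
    have hip : ¬ i ≤ p := by omega
    rw [mooncakeLoop]
    rw [PySem.List.pyRange_one_eq_nil (by omega)]
    simp [hip]
  | succ M ih =>
    intro i cnt hM
    by_cases hip : i ≤ p
    · rw [mooncakeLoop]
      rw [PySem.List.pyRange_one_cons (by omega)]
      simp only [hip, if_pos, List.foldl]
      exact ih (i + 1) (cnt + distributeA (m - 1) (p - i) i) (by omega)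
    · rw [mooncakeLoop]
      rw [PySem.List.pyRange_one_eq_nil (by omega)]
      simp [hip]

-- ===== VERDICT (by name: the statement is the Claim_ definition above) =====
theorem mooncake_spec : Claim_equal_mooncake := by
  intro m n _ _
  unfold Spec_mooncake mooncake mooncake_alt
  obtain ⟨h1, _⟩ := fold_pair_correct
    (fun i memo' => dAlt (m - 1) (n - m - i) i memo')
    (fun i => distributeA (m - 1) (n - m - i) i)
    (fun i memo' h' => dAlt_correct (m - 1).toNat (m - 1) (n - m - i) i memo' le_rfl h')
    (PySem.List.pyRange 0 (n - m + 1) 1) 0 PySem.Dict.empty InvD_empty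
  rw [loopA_eq m (n - m) (n - m + 1).toNat 0 0 (by omega)]
  exact h1.symm
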